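-- pv_equiv track=rewrite | github.com/deepbeepmeep/Wan2GP | shared/utils/prompt_parser.py | split_prompt_units
-- ===== SOURCE A (Python) =====
-- PROMPT_UNIT_PREFIX = "#!PROMPT!:"
--
-- ENHANCED_PROMPT_PREFIX = "!enhanced!\n"
--
-- def split_prompt_units(prompt_text, multi_prompts_gen_type, single_prompt=False, originals=False):
--     prompt_text = prompt_text.replace("\r\n", "\n").replace("\r", "\n")
--     if prompt_text.startswith(ENHANCED_PROMPT_PREFIX):
--         prompt_text = prompt_text[len(ENHANCED_PROMPT_PREFIX):]
--     separator = "\n\n" if "P" in multi_prompts_gen_type else "\n"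
--     prefixed_prompts, prefixed_originals, current_prompt_lines = [], [], None
--     for raw_line in prompt_text.split("\n"):
--         if raw_line.startswith(PROMPT_UNIT_PREFIX):
--             if current_prompt_lines is not None:
--                 prefixed_prompts.append("\n".join(current_prompt_lines).strip())
--             current_prompt_lines = []
--             prefixed_originals.append(raw_line[len(PROMPT_UNIT_PREFIX):].strip())
--         elif current_prompt_lines is not None:
--             current_prompt_lines.append(raw_line)
--     if current_prompt_lines is not None:
--         prefixed_prompts.append("\n".join(current_prompt_lines).strip())
--     if prefixed_prompts:
--         if originals:
--             return [prompt for prompt in prefixed_originals if prompt]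
--         prefixed_prompts = [prompt for prompt in prefixed_prompts if prompt]
--         if not single_prompt:
--             return prefixed_prompts
--         prompt_text = prefixed_prompts[0] if multi_prompts_gen_type == "FG" else separator.join(prefixed_prompts)
--     prompt_lines = [line.rstrip() for line in prompt_text.split("\n") if not line.strip().startswith("#")]
--     prompt_text = "\n".join(prompt_lines).strip()
--     if not prompt_text:
--         return []
--     if single_prompt or multi_prompts_gen_type == "FG":
--         return [prompt_text]
--     if "P" in multi_prompts_gen_type:
--         prompts, current_lines = [], []
--         for raw_line in prompt_text.split("\n"):
--             if not raw_line.strip():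
--                 if current_lines:
--                     prompts.append("\n".join(current_lines).strip())
--                     current_lines = []
--                 continue
--             current_lines.append(raw_line)
--         if current_lines:
--             prompts.append("\n".join(current_lines).strip())
--         return prompts
--     return [one_line.strip() for one_line in prompt_text.split("\n") if one_line.strip()]
-- ===== SOURCE B (Python) =====
-- PROMPT_UNIT_PREFIX = "#!PROMPT!:"
--
-- ENHANCED_PROMPT_PREFIX = "!enhanced!\n"
--
--
-- def _is_marker(line):
--     return line.startswith(PROMPT_UNIT_PREFIX)
--
--
-- def _units(lines):
--     # lines begins with a marker line (or is empty); for each marker emit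
--     # (original, body) where body is the slice of lines up to the next marker.
--     unit_originals, unit_bodies = [], []
--     i = 0
--     while i < len(lines):
--         j = i + 1
--         while j < len(lines) and not _is_marker(lines[j]):
--             j += 1
--         unit_originals.append(lines[i][len(PROMPT_UNIT_PREFIX):].strip())
--         unit_bodies.append("\n".join(lines[i + 1:j]).strip())
--         i = j
--     return unit_originals, unit_bodies
--
--
-- def _paragraphs(lines):
--     # runs of non-blank lines, each joined and stripped
--     out = []
--     i, n = 0, len(lines)
--     while i < n:
--         if not lines[i].strip():
--             i += 1
--             continue
--         j = i
--         while j < n and lines[j].strip():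
--             j += 1
--         out.append("\n".join(lines[i:j]).strip())
--         i = j
--     return out
--
--
-- def split_prompt_units(prompt_text, multi_prompts_gen_type, single_prompt=False, originals=False):
--     text = prompt_text.replace("\r\n", "\n").replace("\r", "\n")
--     if text.startswith(ENHANCED_PROMPT_PREFIX):
--         text = text[len(ENHANCED_PROMPT_PREFIX):]
--     separator = "\n\n" if "P" in multi_prompts_gen_type else "\n"
--     lines = text.split("\n")
--     k = 0
--     while k < len(lines) and not _is_marker(lines[k]):
--         k += 1
--     unit_originals, unit_bodies = _units(lines[k:])
--     if unit_originals:
--         if originals: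
--             return [u for u in unit_originals if u]
--         units = [u for u in unit_bodies if u]
--         if not single_prompt:
--             return units
--         text = units[0] if multi_prompts_gen_type == "FG" else separator.join(units)
--     kept = [line.rstrip() for line in text.split("\n") if not line.strip().startswith("#")]
--     text = "\n".join(kept).strip()
--     if not text:
--         return []
--     if single_prompt or multi_prompts_gen_type == "FG":
--         return [text]
--     if "P" in multi_prompts_gen_type:
--         return _paragraphs(text.split("\n"))
--     return [s for s in map(str.strip, text.split("\n")) if s]
-- ===== Notes on version B (the rewrite author's own statement) =====
-- stated objective: alternative
-- what changed: Replaces A's single stateful per-line loop (Option-sentinel current_prompt_lines, append-as-you-go) with a per-unit span recursion that slices each marker's body block at once, and replaces the blank-line paragraph accumulator with a skip-blanks/span-run scan; the final line branch maps strip before filtering instead of after.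
import Mathlib
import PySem

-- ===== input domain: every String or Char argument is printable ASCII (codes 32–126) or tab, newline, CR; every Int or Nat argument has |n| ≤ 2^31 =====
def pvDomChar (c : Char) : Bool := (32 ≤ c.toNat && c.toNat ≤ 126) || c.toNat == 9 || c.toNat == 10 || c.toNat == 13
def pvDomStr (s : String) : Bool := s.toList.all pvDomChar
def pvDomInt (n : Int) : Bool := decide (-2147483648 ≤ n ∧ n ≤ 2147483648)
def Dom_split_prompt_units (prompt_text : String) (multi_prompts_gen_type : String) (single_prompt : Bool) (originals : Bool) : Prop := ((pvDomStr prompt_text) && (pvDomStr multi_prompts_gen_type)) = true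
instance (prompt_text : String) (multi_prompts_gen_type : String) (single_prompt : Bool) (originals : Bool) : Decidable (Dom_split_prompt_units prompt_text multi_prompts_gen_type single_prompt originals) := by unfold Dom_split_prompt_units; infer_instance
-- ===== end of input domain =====

-- B replaces A's stateful per-line marker accumulation (Option sentinel + append) by a per-unit
-- span/slice recursion, and the blank-line paragraph accumulator by a span recursion (objective:
-- alternative decomposition, same cost). Return-value equivalence only; neither mutates arguments.

def PROMPT_UNIT_PREFIX : String := "#!PROMPT!:"

def ENHANCED_PROMPT_PREFIX : String := "!enhanced!\n"

-- shared with B: `line.startswith(PROMPT_UNIT_PREFIX)`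
def pvIsMarker (line : String) : Bool := PySem.Str.startswith line PROMPT_UNIT_PREFIX

-- shared with B: `not raw_line.strip()` (truthiness of the stripped line)
def pvBlank (line : String) : Bool := PySem.Str.strip line == ""

-- shared with B: `raw_line[len(PROMPT_UNIT_PREFIX):].strip()`  (len(PROMPT_UNIT_PREFIX) = 10)
def pvOrig (line : String) : String := PySem.Str.strip (PySem.Str.slice line (some 10) none)

-- shared with B: `"\n".join(xs).strip()`
def pvJoinStrip (xs : List String) : String := PySem.Str.strip (PySem.Str.join "\n" xs)

-- shared with B: the two .replace calls and the enhanced-prefix strip (len(ENHANCED_PROMPT_PREFIX) = 11)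
def pvNormalize (s : String) : String :=
  let t := PySem.Str.replace (PySem.Str.replace s "\r\n" "\n") "\r" "\n"
  if PySem.Str.startswith t ENHANCED_PROMPT_PREFIX then PySem.Str.slice t (some 11) none else t

-- shared with B: `text.split("\n")` ("\n" ≠ "", so split? is always `some`; .getD [] is never taken)
def pvSplitNL (s : String) : List String := (PySem.Str.split? s "\n").getD []

-- ===== PORT A =====
-- A's marker loop body; state = (prefixed_prompts, prefixed_originals, current_prompt_lines)
def pvAStep (st : List String × List String × Option (List String)) (raw_line : String) :
    List String × List String × Option (List String) :=
  if pvIsMarker raw_line then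
    ((match st.2.2 with
      | some acc => st.1 ++ [pvJoinStrip acc]
      | none => st.1),
     st.2.1 ++ [pvOrig raw_line], some [])
  else
    match st.2.2 with
    | some acc => (st.1, st.2.1, some (acc ++ [raw_line]))
    | none => st

-- A's fallback paragraph loop body; state = (prompts, current_lines)
def pvPStep (st : List String × List String) (raw_line : String) : List String × List String :=
  if pvBlank raw_line then
    if st.2.isEmpty then st else (st.1 ++ [pvJoinStrip st.2], [])
  else (st.1, st.2 ++ [raw_line])

-- A's shared tail: comment filtering + the four final branches (Python reaches it by fall-through)
def pvTailA (t : String) (single_prompt : Bool) (multi_prompts_gen_type : String) : List String :=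
  let kept := ((pvSplitNL t).filter
      (fun line => !PySem.Str.startswith (PySem.Str.strip line) "#")).map PySem.Str.rstrip
  let t := PySem.Str.strip (PySem.Str.join "\n" kept)
  if t == "" then []
  else if single_prompt || multi_prompts_gen_type == "FG" then [t]
  else if PySem.Str.isIn "P" multi_prompts_gen_type then
    let st := (pvSplitNL t).foldl pvPStep ([], [])
    if st.2.isEmpty then st.1 else st.1 ++ [pvJoinStrip st.2]
  else ((pvSplitNL t).filter (fun l => !(PySem.Str.strip l == ""))).map PySem.Str.strip

def split_prompt_units (prompt_text : String) (multi_prompts_gen_type : String) (single_prompt : Bool) (originals : Bool) : List String :=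
  let t := pvNormalize prompt_text
  let separator := if PySem.Str.isIn "P" multi_prompts_gen_type then "\n\n" else "\n"
  let st := (pvSplitNL t).foldl pvAStep ([], [], none)
  let prefixed_prompts :=
    match st.2.2 with
    | some acc => st.1 ++ [pvJoinStrip acc]
    | none => st.1
  if prefixed_prompts.isEmpty then pvTailA t single_prompt multi_prompts_gen_type
  else if originals then st.2.1.filter (fun p => !(p == ""))
  else
    let pp := prefixed_prompts.filter (fun p => !(p == ""))
    if !single_prompt then pp
    else
      -- `prefixed_prompts[0]`: Python raises IndexError when pp = [] (excluded by Pre_); .getD "" there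
      pvTailA (if multi_prompts_gen_type == "FG" then (PySem.List.pyGet? pp 0).getD ""
               else PySem.Str.join separator pp) single_prompt multi_prompts_gen_type

-- ===== PORT B =====
-- B's _units: outer recursion per marker, inner span (takeWhile/dropWhile) slicing the body block
def pvUnits : List String → List String × List String
  | [] => ([], [])
  | m :: rest =>
    let body := rest.takeWhile (fun l => !pvIsMarker l)
    let rest' := rest.dropWhile (fun l => !pvIsMarker l)
    let u := pvUnits rest'
    (pvOrig m :: u.1, pvJoinStrip body :: u.2)
termination_by ls => ls.length
decreasing_by
  have := List.length_dropWhile_le (fun l => !pvIsMarker l) rest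
  simp; omega

-- B's _paragraphs: skip blanks, span a run of non-blank lines, emit it, recurse on the rest
def pvParas : List String → List String
  | [] => []
  | l :: ls =>
    if pvBlank l then pvParas ls
    else pvJoinStrip (l :: ls.takeWhile (fun x => !pvBlank x)) :: pvParas (ls.dropWhile (fun x => !pvBlank x))
termination_by ls => ls.length
decreasing_by
  · simp
  · have := List.length_dropWhile_le (fun x => !pvBlank x) ls
    simp; omega

-- B's tail: same comment filtering, paragraphs via pvParas, last branch maps strip then filters
def pvTailB (t : String) (single_prompt : Bool) (multi_prompts_gen_type : String) : List String :=
  let kept := ((pvSplitNL t).filter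
      (fun line => !PySem.Str.startswith (PySem.Str.strip line) "#")).map PySem.Str.rstrip
  let t := PySem.Str.strip (PySem.Str.join "\n" kept)
  if t == "" then []
  else if single_prompt || multi_prompts_gen_type == "FG" then [t]
  else if PySem.Str.isIn "P" multi_prompts_gen_type then pvParas (pvSplitNL t)
  else ((pvSplitNL t).map PySem.Str.strip).filter (fun s => !(s == ""))

def split_prompt_units_alt (prompt_text : String) (multi_prompts_gen_type : String) (single_prompt : Bool) (originals : Bool) : List String :=
  let t := pvNormalize prompt_text
  let separator := if PySem.Str.isIn "P" multi_prompts_gen_type then "\n\n" else "\n"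
  let u := pvUnits ((pvSplitNL t).dropWhile (fun l => !pvIsMarker l))
  if u.1.isEmpty then pvTailB t single_prompt multi_prompts_gen_type
  else if originals then u.1.filter (fun p => !(p == ""))
  else
    let units := u.2.filter (fun p => !(p == ""))
    if !single_prompt then units
    else
      -- `units[0]`: Python raises IndexError when units = [] (excluded by Pre_); .getD "" there
      pvTailB (if multi_prompts_gen_type == "FG" then (PySem.List.pyGet? units 0).getD ""
               else PySem.Str.join separator units) single_prompt multi_prompts_gen_type

-- ===== PRECONDITION & SPEC =====
-- Pre_ excludes exactly the inputs on which Python A raises IndexError (prefixed_prompts[0] of an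
-- empty filtered list): single_prompt with gen type "FG", originals=False, at least one marker line,
-- and every line after the first marker a marker or blank (so every unit body strips to "").
-- My Python B raises the same IndexError there.
def Pre_split_prompt_units (prompt_text : String) (multi_prompts_gen_type : String) (single_prompt : Bool) (originals : Bool) : Prop :=
  ¬ (single_prompt = true ∧ originals = false ∧ multi_prompts_gen_type = "FG" ∧
      (let d := (pvSplitNL (pvNormalize prompt_text)).dropWhile (fun l => !pvIsMarker l)
       d ≠ [] ∧ d.all (fun l => pvIsMarker l || pvBlank l)))
instance (prompt_text : String) (multi_prompts_gen_type : String) (single_prompt : Bool) (originals : Bool) : Decidable (Pre_split_prompt_units prompt_text multi_prompts_gen_type single_prompt originals) := by unfold Pre_split_prompt_units; infer_instance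

def pvWitness_split_prompt_units : String × String × Bool × Bool := ("#!PROMPT!: a\nbody\n\ntail", "P", true, false)

def Spec_split_prompt_units (prompt_text : String) (multi_prompts_gen_type : String) (single_prompt : Bool) (originals : Bool) (out : List String) : Prop := out = split_prompt_units_alt prompt_text multi_prompts_gen_type single_prompt originals
instance (prompt_text : String) (multi_prompts_gen_type : String) (single_prompt : Bool) (originals : Bool) (out : List String) : Decidable (Spec_split_prompt_units prompt_text multi_prompts_gen_type single_prompt originals out) := by unfold Spec_split_prompt_units; infer_instance

-- ===== CLAIM (what is proved, stated in full; the proofs are below) =====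
def Claim_equal_split_prompt_units : Prop := ∀ (prompt_text : String) (multi_prompts_gen_type : String) (single_prompt : Bool) (originals : Bool), Dom_split_prompt_units prompt_text multi_prompts_gen_type single_prompt originals → Pre_split_prompt_units prompt_text multi_prompts_gen_type single_prompt originals → Spec_split_prompt_units prompt_text multi_prompts_gen_type single_prompt originals (split_prompt_units prompt_text multi_prompts_gen_type single_prompt originals)

-- ===== LEMMAS AND PROOFS =====

-- flush of A's marker-loop state, as the pair (originals, prompts)
def pvFlushA (st : List String × List String × Option (List String)) : List String × List String :=
  (st.2.1, match st.2.2 with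
           | some acc => st.1 ++ [pvJoinStrip acc]
           | none => st.1)

-- flush of A's paragraph-loop state
def pvFlushP (st : List String × List String) : List String :=
  if st.2.isEmpty then st.1 else st.1 ++ [pvJoinStrip st.2]

lemma pvA_some (n : Nat) : ∀ (ls : List String), ls.length ≤ n → ∀ ps os acc,
    pvFlushA (ls.foldl pvAStep (ps, os, some acc)) =
      (os ++ (pvUnits (ls.dropWhile (fun l => !pvIsMarker l))).1,
       ps ++ pvJoinStrip (acc ++ ls.takeWhile (fun l => !pvIsMarker l)) ::
             (pvUnits (ls.dropWhile (fun l => !pvIsMarker l))).2) := by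
  induction n with
  | zero =>
    intro ls h ps os acc
    have : ls = [] := List.eq_nil_of_length_eq_zero (by omega)
    subst this
    simp [pvFlushA, pvUnits]
  | succ n ih =>
    intro ls h ps os acc
    cases ls with
    | nil => simp [pvFlushA, pvUnits]
    | cons l ls =>
      by_cases hm : pvIsMarker l = true
      · have hstep : pvAStep (ps, os, some acc) l =
            (ps ++ [pvJoinStrip acc], os ++ [pvOrig l], some []) := by
          simp [pvAStep, hm]
        rw [List.foldl_cons, hstep, ih ls (by simpa using Nat.le_of_succ_le_succ h)]
        simp [pvUnits, hm]
      · have hstep : pvAStep (ps, os, some acc) l = (ps, os, some (acc ++ [l])) := by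
          simp [pvAStep, hm]
        rw [List.foldl_cons, hstep, ih ls (by simpa using Nat.le_of_succ_le_succ h)]
        simp [hm]

lemma pvA_top (ls : List String) :
    pvFlushA (ls.foldl pvAStep ([], [], none)) =
      pvUnits (ls.dropWhile (fun l => !pvIsMarker l)) := by
  induction ls with
  | nil => simp [pvFlushA, pvUnits]
  | cons l ls ih =>
    by_cases hm : pvIsMarker l = true
    · have hstep : pvAStep ([], [], none) l = ([], [pvOrig l], some []) := by
        simp [pvAStep, hm]
      rw [List.foldl_cons, hstep, pvA_some ls.length ls le_rfl]
      simp [pvUnits, hm]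
    · have hstep : pvAStep ([], [], none) l = ([], [], none) := by
        simp [pvAStep, hm]
      rw [List.foldl_cons, hstep, ih]
      simp [hm]

lemma pvP_both (n : Nat) : ∀ (ls : List String), ls.length ≤ n →
    (∀ p, pvFlushP (ls.foldl pvPStep (p, [])) = p ++ pvParas ls) ∧
    (∀ p cur, cur ≠ [] →
      pvFlushP (ls.foldl pvPStep (p, cur)) =
        p ++ pvJoinStrip (cur ++ ls.takeWhile (fun x => !pvBlank x)) ::
             pvParas (ls.dropWhile (fun x => !pvBlank x))) := by
  induction n with
  | zero =>
    intro ls h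
    have : ls = [] := List.eq_nil_of_length_eq_zero (by omega)
    subst this
    constructor
    · intro p; simp [pvFlushP, pvParas]
    · intro p cur hc; simp [pvFlushP, pvParas, hc]
  | succ n ih =>
    intro ls h
    cases ls with
    | nil =>
      constructor
      · intro p; simp [pvFlushP, pvParas]
      · intro p cur hc; simp [pvFlushP, pvParas, hc]
    | cons l ls =>
      have hlen : ls.length ≤ n := by simpa using Nat.le_of_succ_le_succ h
      constructor
      · intro p
        by_cases hb : pvBlank l = true
        · have hstep : pvPStep (p, []) l = (p, []) := by simp [pvPStep, hb]
          rw [List.foldl_cons, hstep, (ih ls hlen).1]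
          simp [pvParas, hb]
        · have hstep : pvPStep (p, []) l = (p, [l]) := by simp [pvPStep, hb]
          rw [List.foldl_cons, hstep, (ih ls hlen).2 p [l] (by simp)]
          simp [pvParas, hb]
      · intro p cur hc
        by_cases hb : pvBlank l = true
        · have hstep : pvPStep (p, cur) l = (p ++ [pvJoinStrip cur], []) := by
            simp [pvPStep, hb, hc]
          rw [List.foldl_cons, hstep, (ih ls hlen).1]
          simp [pvParas, hb]
        · have hstep : pvPStep (p, cur) l = (p, cur ++ [l]) := by simp [pvPStep, hb]
          rw [List.foldl_cons, hstep, (ih ls hlen).2 p (cur ++ [l]) (by simp)]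
          simp [hb]

lemma pvFold_paras (ls : List String) :
    (if ((ls.foldl pvPStep ([], [])).2.isEmpty) then (ls.foldl pvPStep ([], [])).1
     else (ls.foldl pvPStep ([], [])).1 ++ [pvJoinStrip (ls.foldl pvPStep ([], [])).2]) = pvParas ls := by
  have h := (pvP_both ls.length ls le_rfl).1 []
  simpa [pvFlushP] using h

lemma pvTail_eq (t : String) (sp : Bool) (mt : String) : pvTailA t sp mt = pvTailB t sp mt := by
  unfold pvTailA pvTailB
  simp only []
  set s2 := PySem.Str.strip (PySem.Str.join "\n" (((pvSplitNL t).filter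
      (fun line => !PySem.Str.startswith (PySem.Str.strip line) "#")).map PySem.Str.rstrip)) with hs2
  set ls2 := pvSplitNL s2 with hls2
  clear_value ls2
  split_ifs with h1 h2 h3 h4
  · rfl
  · rfl
  · have h := pvFold_paras ls2; rw [if_pos h4] at h; exact h
  · have h := pvFold_paras ls2; rw [if_neg h4] at h; exact h
  · rw [List.filter_map]; congr 1

lemma pvUnits_isEmpty (ls : List String) : (pvUnits ls).1.isEmpty = (pvUnits ls).2.isEmpty := by
  cases ls <;> simp [pvUnits]

-- ===== VERDICT (by name: the statement is the Claim_ definition above) =====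
theorem split_prompt_units_spec : Claim_equal_split_prompt_units := by
  unfold Claim_equal_split_prompt_units
  intro pt mt sp og _ _
  unfold Spec_split_prompt_units split_prompt_units split_prompt_units_alt
  simp only []
  set L := pvSplitNL (pvNormalize pt) with hL
  set st := L.foldl pvAStep ([], [], none) with hst
  set u := pvUnits (L.dropWhile (fun l => !pvIsMarker l)) with hu
  have htop : pvFlushA st = u := by rw [hst, hu, hL]; exact pvA_top _
  clear_value L st u
  have h1 : st.2.1 = u.1 := by rw [← htop]; rfl
  have h2 : (match st.2.2 with
      | some acc => st.1 ++ [pvJoinStrip acc]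
      | none => st.1) = u.2 := by rw [← htop]; rfl
  have he : u.1.isEmpty = u.2.isEmpty := by
    rw [hu]; exact pvUnits_isEmpty _
  rw [h1, h2, ← he, pvTail_eq, pvTail_eq]
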